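-- pv_equiv track=rewrite | github.com/wimton/Meter-peach | Tools/scripts/python/getGoogleProjectDoc.py | __isStartTag
-- ===== SOURCE A (Python) =====
-- def __isStartTag(tag, attrs):
--     if tag != 'div':
--         return False
--     classFound = False
--     idFound = False
--     for attrKey, attrValue in attrs:
--         if attrKey == 'class':
--             classFound = True
--             if attrValue != 'vt':
--                 return False
--         elif attrKey == 'id':
--             idFound = True
--             if attrValue != 'wikimaincol':
--                 return False
--     return classFound and idFound
-- ===== SOURCE B (Python) =====
-- def __isStartTag(tag, attrs):
--     if tag != 'div':
--         return False
--     classes = [v for k, v in attrs if k == 'class']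
--     ids = [v for k, v in attrs if k == 'id']
--     return (bool(classes) and bool(ids)
--             and all(v == 'vt' for v in classes)
--             and all(v == 'wikimaincol' for v in ids))
-- ===== Notes on version B (the rewrite author's own statement) =====
-- stated objective: simpler
-- what changed: Replaces the flag-tracking early-return loop with grouped filtering: collect the 'class' and 'id' values by comprehension, then check non-emptiness and all-equal predicates.
import Mathlib
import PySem

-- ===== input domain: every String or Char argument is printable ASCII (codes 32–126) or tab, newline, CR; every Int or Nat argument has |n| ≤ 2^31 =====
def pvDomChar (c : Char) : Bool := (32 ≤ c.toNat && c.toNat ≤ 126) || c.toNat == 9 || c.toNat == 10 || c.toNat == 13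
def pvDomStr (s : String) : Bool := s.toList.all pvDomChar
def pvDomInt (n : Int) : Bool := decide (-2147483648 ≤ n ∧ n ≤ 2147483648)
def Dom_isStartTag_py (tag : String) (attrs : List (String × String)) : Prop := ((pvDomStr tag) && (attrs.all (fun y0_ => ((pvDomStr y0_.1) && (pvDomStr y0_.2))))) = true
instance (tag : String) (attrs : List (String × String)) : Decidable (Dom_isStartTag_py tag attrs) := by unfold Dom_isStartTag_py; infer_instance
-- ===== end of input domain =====

-- B replaces A's flag-tracking early-return loop with grouped filtering (collect 'class'/'id' values, then aggregate checks); objective: simpler.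


-- ===== PORT A =====
-- the for-loop with early returns, as structural recursion over attrs carrying the two flags
def isStartTagLoopA : List (String × String) → Bool → Bool → Bool
  | [], classFound, idFound => classFound && idFound
  | (attrKey, attrValue) :: rest, classFound, idFound =>
    if attrKey == "class" then
      if attrValue != "vt" then false
      else isStartTagLoopA rest true idFound
    else if attrKey == "id" then
      if attrValue != "wikimaincol" then false
      else isStartTagLoopA rest classFound true
    else isStartTagLoopA rest classFound idFound

def isStartTag_py (tag : String) (attrs : List (String × String)) : Bool :=
  if tag != "div" then false
  else isStartTagLoopA attrs false false

-- ===== PORT B =====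
def isStartTag_py_alt (tag : String) (attrs : List (String × String)) : Bool :=
  if tag != "div" then false
  else
    let classes := (attrs.filter (fun kv => kv.1 == "class")).map (·.2)
    let ids := (attrs.filter (fun kv => kv.1 == "id")).map (·.2)
    !classes.isEmpty && !ids.isEmpty &&
      classes.all (· == "vt") && ids.all (· == "wikimaincol")

-- ===== PRECONDITION & SPEC =====
def Spec_isStartTag_py (tag : String) (attrs : List (String × String)) (out : Bool) : Prop := out = isStartTag_py_alt tag attrs
instance (tag : String) (attrs : List (String × String)) (out : Bool) : Decidable (Spec_isStartTag_py tag attrs out) := by unfold Spec_isStartTag_py; infer_instance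

-- ===== CLAIM (what is proved, stated in full; the proofs are below) =====
def Claim_equal_isStartTag_py : Prop := ∀ (tag : String) (attrs : List (String × String)), Dom_isStartTag_py tag attrs → Spec_isStartTag_py tag attrs (isStartTag_py tag attrs)

-- ===== LEMMAS AND PROOFS =====

-- filter non-emptiness is 'any'
theorem filter_isEmpty_eq {α : Type} (p : α → Bool) (l : List α) :
    (l.filter p).isEmpty = !l.any p := by
  induction l with
  | nil => simp
  | cons hd tl ih => by_cases h : p hd <;> simp [h, ih]

-- A's loop, with flags cf/idf, equals the aggregate characterisation B computes.
theorem isStartTagLoopA_eq (attrs : List (String × String)) :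
    ∀ cf idf : Bool,
      isStartTagLoopA attrs cf idf =
        ((cf || attrs.any (fun kv => kv.1 == "class")) &&
         (idf || attrs.any (fun kv => kv.1 == "id")) &&
         ((attrs.filter (fun kv => kv.1 == "class")).map (·.2)).all (· == "vt") &&
         ((attrs.filter (fun kv => kv.1 == "id")).map (·.2)).all (· == "wikimaincol")) := by
  induction attrs with
  | nil => intro cf idf; simp [isStartTagLoopA]
  | cons hd tl ih =>
    intro cf idf
    obtain ⟨k, v⟩ := hd
    by_cases hk : k = "class"
    · subst hk
      by_cases hv : v = "vt"
      · subst hv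
        simp [isStartTagLoopA, ih]
      · simp [isStartTagLoopA, hv]
    · by_cases hk2 : k = "id"
      · subst hk2
        by_cases hv : v = "wikimaincol"
        · subst hv
          simp [isStartTagLoopA, ih]
        · simp [isStartTagLoopA, hv]
      · have h1 : (k == "class") = false := by simp [hk]
        have h2 : (k == "id") = false := by simp [hk2]
        simp [isStartTagLoopA, h1, h2, ih]

-- ===== VERDICT (by name: the statement is the Claim_ definition above) =====
theorem isStartTag_py_spec : Claim_equal_isStartTag_py := by
  intro tag attrs _
  unfold Spec_isStartTag_py isStartTag_py isStartTag_py_alt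
  by_cases ht : tag = "div"
  · simp [ht, isStartTagLoopA_eq, filter_isEmpty_eq]
  · simp [ht]
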